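/- GENERATED by farm/mkstatement.py from design/units.tsv (unit `digest_extensions.2`) and the assertions of Gif/Spec/Seg_digest_extensions.lean — do not edit.
   THE STATEMENT of the proof unit `digest_extensions.2`: segment 2 of `digest_extensions` (29 instructions; entries 0x10568d;
   exits 0x10568d,0x1056f0; ranges 0x10568d-0x1056f0,0x105689-0x10568d)
   takes each of its entry assertions to one of its exit assertions (`Gif.Spec.digest_extensions.Seg2`), given the contracts of its callees.
   What the names mean: ProgX/Base/Spec/Basic.lean (the shared hypotheses), Gif/Spec/Seg_digest_extensions.lean (the assertions). The theorem to prove: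
   `theorem digest_extensions_2_ok : Gif.Spec.digest_extensions_2.Statement`. -/
import Gif.Code
import Gif.Dec.All
import Gif.Labels
import Gif.Spec.Driver
import Gif.Spec.Seg_digest_extensions
namespace Gif.Spec.digest_extensions_2
open X86 X86.User Asan

/-- The statement of unit `digest_extensions.2`. -/
def Statement : Prop :=
  ∀ (Lay : Layout) (_hLay : Lay.hi = 0x1000000) (μ : Microarch) (_hμ : UserX.MicroOK μ) (u₀ : State)
    (_hcode : HasCodeNat Lay u₀ Gif.L.digest_extensions.entry Gif.Code.code_digest_extensions.nat Gif.L.digest_extensions.size)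
    (_h_digest_int : Calls Lay μ ProgX.Base.WayInv (ProgX.Base.conv u₀) Gif.L.digest_int.entry Gif.Spec.digest_int.spec)
    (_h_digest_bytes : ∀ (H : Heap) (rest : List Obj) (frames : List (Nat × FrameLayout)), Calls Lay μ ProgX.Base.WayInv (ProgX.Base.conv u₀) Gif.L.digest_bytes.entry (Gif.Spec.digest_bytes.spec H rest frames))
    (_h_asan_load4_noabort : Asan.SmallCheck Lay μ ProgX.Base.WayInv (ProgX.Base.CodeOK u₀) [.rax, .rcx, .rdx] 4 ProgX.Base.L.__asan_load4_noabort.entry)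
    (_h_asan_load8_noabort : Asan.SmallCheck Lay μ ProgX.Base.WayInv (ProgX.Base.CodeOK u₀) [.rax, .rcx, .rdx] 8 ProgX.Base.L.__asan_load8_noabort.entry),
    Gif.Spec.digest_extensions.Seg2 Lay μ u₀

end Gif.Spec.digest_extensions_2
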